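-- pv_equiv track=rewrite | github.com/Annurb/Python-exercises | Revisao p2/006.py | quantos_dias
-- ===== SOURCE A (Python) =====
-- def quantos_dias(fita, f, dias):
--     contador = 0
--     for k in range(f):
--         if k != 0 and k < f-1 and fita[k] == 1 and contador == 0:
--             if fita[k-1] == 0 or fita[k+1] == 0:
--                 fita[k-1] = 1
--                 fita[k+1] = 1
--                 contador = 1
--         elif k == f-1 and fita[k] == 1:
--             if fita[k-1] == 0:
--                 fita[k-1] = 1
--         else:
--             contador = 0
--     if 0 in fita:
--         dias +=1
--         return quantos_dias(fita, f, dias)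
--     else:
--         dias+=1
--         return dias
-- ===== SOURCE B (Python) =====
-- def _um_passo(fita, f):
--     # one day's spread over the first f cells, rebuilt functionally (no mutation)
--     if f < 2:
--         return list(fita)
--     head, tail = fita[:f], fita[f:]
--     out = []
--     prev, cur = head[0], head[1]
--     contador = 0
--     for nxt in head[2:]:
--         if cur == 1 and contador == 0 and (prev == 0 or nxt == 0):
--             out.append(1)
--             prev, cur, contador = cur, 1, 1
--         else:
--             out.append(prev)
--             prev, cur, contador = cur, nxt, 0
--     if cur == 1 and prev == 0:
--         prev = 1
--     out.append(prev)
--     out.append(cur)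
--     return out + tail
--
-- def quantos_dias(fita, f, dias):
--     strip = list(fita)
--     while True:
--         strip = _um_passo(strip, f)
--         dias += 1
--         if 0 not in strip:
--             return dias
-- ===== Notes on version B (the rewrite author's own statement) =====
-- stated objective: alternative
-- what changed: A mutates the strip in place via index reads/writes (fita[k-1], fita[k+1]) inside an indexed for-loop and tail-recurses over days; B rebuilds each day's strip functionally with a sliding three-cell window (prev, cur, next) walked structurally over the list, inside an explicit while loop over days, never mutating the input.
-- outside the precondition, e.g. on quantos_dias([0, 1, 2], 3, 0): A returns 1, B returns 1
import Mathlib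
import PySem

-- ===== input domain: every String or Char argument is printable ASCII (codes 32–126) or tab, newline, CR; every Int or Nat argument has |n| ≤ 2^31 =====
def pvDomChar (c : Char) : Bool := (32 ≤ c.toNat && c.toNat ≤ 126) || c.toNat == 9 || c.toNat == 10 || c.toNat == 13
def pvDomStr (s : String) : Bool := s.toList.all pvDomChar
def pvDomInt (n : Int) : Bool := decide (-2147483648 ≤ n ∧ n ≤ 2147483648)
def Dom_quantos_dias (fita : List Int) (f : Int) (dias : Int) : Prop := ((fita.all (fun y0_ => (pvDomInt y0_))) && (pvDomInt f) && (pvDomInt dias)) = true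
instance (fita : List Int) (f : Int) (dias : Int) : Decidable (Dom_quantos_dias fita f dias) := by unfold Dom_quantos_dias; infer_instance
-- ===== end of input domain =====

-- B rebuilds each day's strip functionally with a sliding three-cell window walked structurally
-- over the list, in an explicit day loop (objective: alternative). A mutates `fita` in place in
-- Python, B works on a copy; the equivalence proved here is about the RETURN value only.

-- ===== PORT A =====
-- one iteration of A's inline `for k in range(f)` body; state = (fita, contador)
def passoA (f : Int) (st : List Int × Int) (k : Int) : List Int × Int :=
  if k ≠ 0 ∧ k < f - 1 ∧ PySem.List.pyGet? st.1 k = some 1 ∧ st.2 = 0 then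
    if PySem.List.pyGet? st.1 (k - 1) = some 0 ∨ PySem.List.pyGet? st.1 (k + 1) = some 0 then
      (PySem.List.pySetD (PySem.List.pySetD st.1 (k - 1) 1) (k + 1) 1, 1)
    else st
  else if k = f - 1 ∧ PySem.List.pyGet? st.1 k = some 1 then
    if PySem.List.pyGet? st.1 (k - 1) = some 0 then (PySem.List.pySetD st.1 (k - 1) 1, st.2)
    else st
  else (st.1, 0)

-- A's recursion; fuel (count of zeros + 1) only makes the recursion total in Lean:
-- whenever the Python terminates each recursive call strictly decreases the zero count,
-- so the fuel is never exhausted there.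
def quantosAux : Nat → List Int → Int → Int → Int
  | 0, _, _, dias => dias
  | fuel + 1, fita, f, dias =>
    let st := (PySem.List.pyRange 0 f 1).foldl (passoA f) (fita, 0)
    if 0 ∈ st.1 then quantosAux fuel st.1 f (dias + 1) else dias + 1

def quantos_dias (fita : List Int) (f : Int) (dias : Int) : Int :=
  quantosAux (fita.count 0 + 1) fita f dias

-- ===== PORT B =====
-- B's `while resto:` window walk, accumulator `out`; base case is the last-cell rule
def janela (out : List Int) (prev cur contador : Int) : List Int → List Int
  | [] => out ++ [if cur = 1 ∧ prev = 0 then 1 else prev, cur]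
  | nxt :: resto =>
    if cur = 1 ∧ contador = 0 ∧ (prev = 0 ∨ nxt = 0) then
      janela (out ++ [1]) cur 1 1 resto
    else
      janela (out ++ [prev]) cur nxt 0 resto

-- B's `_um_passo`: split at f, walk the head, reattach the tail
def umPasso (fita : List Int) (f : Int) : List Int :=
  if f < 2 then fita
  else
    match PySem.List.slice fita none (some f), PySem.List.slice fita (some f) none with
    | p :: c :: resto, tl => janela [] p c 0 resto ++ tl
    | _, _ => fita  -- head[0]/head[1] would raise in Python (strip shorter than 2); outside Pre_

-- B's `while True` day loop; same fuel-for-totality guard as A's port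
def diasLoop : Nat → List Int → Int → Int → Int
  | 0, _, _, dias => dias
  | fuel + 1, strip, f, dias =>
    let strip' := umPasso strip f
    if 0 ∉ strip' then dias + 1 else diasLoop fuel strip' f (dias + 1)

def quantos_dias_alt (fita : List Int) (f : Int) (dias : Int) : Int :=
  diasLoop (fita.count 0 + 1) fita f dias

-- ===== PRECONDITION & SPEC =====
-- Pre_ excludes the inputs on which A raises IndexError (f > len(fita)) or recurses forever
-- (a remaining 0 that the spread can never clear); to keep it closed-form it requires, whenever a 0
-- is present, that f = len(fita), all cells are 0/1 and some cell past index 0 is 1 — this also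
-- drops some terminating inputs with non-binary cells, on which A and B return the same value.
def Pre_quantos_dias (fita : List Int) (f : Int) (dias : Int) : Prop :=
  f ≤ fita.length ∧
    (0 ∉ fita ∨ (f = fita.length ∧ (∀ x ∈ fita, x = 0 ∨ x = 1) ∧ 1 ∈ fita.tail))
instance (fita : List Int) (f : Int) (dias : Int) : Decidable (Pre_quantos_dias fita f dias) := by
  unfold Pre_quantos_dias; infer_instance

def pvWitness_quantos_dias : List Int × Int × Int := ([0, 1, 0], 3, 0)

def Spec_quantos_dias (fita : List Int) (f : Int) (dias : Int) (out : Int) : Prop := out = quantos_dias_alt fita f dias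
instance (fita : List Int) (f : Int) (dias : Int) (out : Int) : Decidable (Spec_quantos_dias fita f dias out) := by unfold Spec_quantos_dias; infer_instance

-- ===== CLAIM (what is proved, stated in full; the proofs are below) =====
def Claim_equal_quantos_dias : Prop := ∀ (fita : List Int) (f : Int) (dias : Int), Dom_quantos_dias fita f dias → Pre_quantos_dias fita f dias → Spec_quantos_dias fita f dias (quantos_dias fita f dias)

-- ===== LEMMAS AND PROOFS =====

-- the accumulator only prefixes the window walk's output
theorem janela_acc (resto : List Int) : ∀ (out : List Int) (prev cur c : Int),
    janela out prev cur c resto = out ++ janela [] prev cur c resto := by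
  induction resto with
  | nil => intro out prev cur c; simp [janela]
  | cons nxt resto ih =>
    intro out prev cur c
    simp only [janela]
    split_ifs with h
    · rw [ih (out ++ [1]), ih ([] ++ [1])]; simp
    · rw [ih (out ++ [prev]), ih ([] ++ [prev])]; simp

-- core: the window walk over out ++ prev :: cur :: resto ++ tl computes A's fold from index |out|+1
theorem janela_eq_fold (resto : List Int) : ∀ (out tl : List Int) (prev cur c : Int)
    (f : Int), f = (out.length : Int) + 2 + resto.length →
    ((PySem.List.pyRange ((out.length : Int) + 1) f 1).foldl (passoA f)
        (out ++ prev :: cur :: (resto ++ tl), c)).1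
      = out ++ janela [] prev cur c resto ++ tl := by
  induction resto with
  | nil =>
    intro out tl prev cur c f hf
    simp only [List.length_nil, Nat.cast_zero, add_zero] at hf
    have hcur : PySem.List.pyGet? (out ++ prev::cur::tl) ((out.length:Int)+1) = some cur := by
      have h := PySem.List.pyGet?_append_length (pre := out ++ [prev]) (y := cur) (ys := tl)
      simpa using h
    have hprev : PySem.List.pyGet? (out ++ prev::cur::tl) ((out.length:Int)+1-1) = some prev := by
      have h := PySem.List.pyGet?_append_length (pre := out) (y := prev) (ys := cur::tl)
      simpa using h
    have hset : PySem.List.pySetD (out ++ prev::cur::tl) ((out.length:Int)+1-1) 1 = out ++ 1::cur::tl := by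
      have he : ((out.length:Int)+1-1) = ((out.length:Nat):Int) := by ring
      rw [he, PySem.List.pySetD_natCast]; simp
    rw [PySem.List.pyRange_one_cons (by omega), PySem.List.pyRange_one_eq_nil (by omega)]
    simp only [List.nil_append, List.foldl_cons, List.foldl_nil]
    unfold passoA
    split_ifs with h1 h2 h3 h4 <;>
      simp_all [janela] <;> omega
  | cons nxt resto ih =>
    intro out tl prev cur c f hf
    have hlen : ((nxt :: resto).length : Int) = (resto.length : Int) + 1 := by push_cast [List.length_cons]; ring
    rw [hlen] at hf
    have hcur : PySem.List.pyGet? (out ++ prev::cur::((nxt::resto) ++ tl)) ((out.length:Int)+1) = some cur := by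
      have h := PySem.List.pyGet?_append_length (pre := out ++ [prev]) (y := cur) (ys := (nxt::resto) ++ tl)
      simpa using h
    have hprev : PySem.List.pyGet? (out ++ prev::cur::((nxt::resto) ++ tl)) ((out.length:Int)+1-1) = some prev := by
      have h := PySem.List.pyGet?_append_length (pre := out) (y := prev) (ys := cur::((nxt::resto) ++ tl))
      simpa using h
    have hnxt : PySem.List.pyGet? (out ++ prev::cur::((nxt::resto) ++ tl)) ((out.length:Int)+1+1) = some nxt := by
      have h := PySem.List.pyGet?_append_length (pre := out ++ [prev, cur]) (y := nxt) (ys := resto ++ tl)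
      push_cast at h; simpa [add_assoc] using h
    rw [PySem.List.pyRange_one_cons (by omega)]
    simp only [List.foldl_cons]
    by_cases hb : cur = 1 ∧ c = 0 ∧ (prev = 0 ∨ nxt = 0)
    · -- spread fires
      have hs1 : PySem.List.pySetD (out ++ prev::cur::((nxt::resto) ++ tl)) ((out.length:Int)+1-1) 1
          = out ++ 1::cur::((nxt::resto) ++ tl) := by
        have he : ((out.length:Int)+1-1) = ((out.length:Nat):Int) := by ring
        rw [he, PySem.List.pySetD_natCast]; simp
      have hs2 : PySem.List.pySetD (out ++ 1::cur::((nxt::resto) ++ tl)) ((out.length:Int)+1+1) (1:Int)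
          = out ++ 1::cur::1::(resto ++ tl) := by
        have he : ((out.length:Int)+1+1) = (((out.length+2:Nat)):Int) := by push_cast; ring
        rw [he, PySem.List.pySetD_natCast]; simp
      have hstep : passoA f (out ++ prev::cur::((nxt::resto) ++ tl), c) ((out.length:Int)+1)
          = (out ++ 1::cur::1::(resto ++ tl), 1) := by
        unfold passoA
        dsimp only
        rw [if_pos ⟨by omega, by omega, by rw [hcur, hb.1], hb.2.1⟩,
            if_pos (by rcases hb.2.2 with h|h
                       · exact Or.inl (by rw [hprev, h])
                       · exact Or.inr (by rw [hnxt, h]))]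
        rw [hs1, hs2]
      rw [hstep]
      have hre : out ++ (1:Int)::cur::1::(resto ++ tl) = (out ++ [1]) ++ cur::(1:Int)::(resto ++ tl) := by simp
      have harg : (out.length:Int) + 1 + 1 = (((out ++ [1]).length : Int) + 1) := by simp
      rw [hre, harg, ih (out ++ [1]) tl cur 1 1 f (by simp; omega)]
      simp only [janela, if_pos hb]
      rw [janela_acc resto ([] ++ [1])]
      simp
    · -- no spread: state advances with contador 0
      have hstep : passoA f (out ++ prev::cur::((nxt::resto) ++ tl), c) ((out.length:Int)+1)
          = (out ++ prev::cur::((nxt::resto) ++ tl), 0) := by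
        unfold passoA
        dsimp only
        by_cases h1 : ((out.length:Int)+1 ≠ 0 ∧ (out.length:Int)+1 < f - 1 ∧
            PySem.List.pyGet? (out ++ prev::cur::((nxt::resto) ++ tl)) ((out.length:Int)+1) = some 1 ∧ c = 0)
        · have hc1 : cur = 1 := by have := h1.2.2.1; rw [hcur] at this; exact Option.some.inj this
          have hno : ¬ (PySem.List.pyGet? (out ++ prev::cur::((nxt::resto) ++ tl)) ((out.length:Int)+1-1) = some 0
              ∨ PySem.List.pyGet? (out ++ prev::cur::((nxt::resto) ++ tl)) ((out.length:Int)+1+1) = some 0) := by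
            rintro (h|h)
            · rw [hprev] at h; exact hb ⟨hc1, h1.2.2.2, Or.inl (Option.some.inj h)⟩
            · rw [hnxt] at h; exact hb ⟨hc1, h1.2.2.2, Or.inr (Option.some.inj h)⟩
          rw [if_pos h1, if_neg hno, h1.2.2.2]
        · rw [if_neg h1, if_neg (by rw [hcur]; rintro ⟨h2, _⟩; omega)]
      rw [hstep]
      have hre : out ++ prev::cur::((nxt::resto) ++ tl) = (out ++ [prev]) ++ cur::nxt::(resto ++ tl) := by simp
      have harg : (out.length:Int) + 1 + 1 = (((out ++ [prev]).length : Int) + 1) := by simp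
      rw [hre, harg, ih (out ++ [prev]) tl cur nxt 0 f (by simp; omega)]
      simp only [janela, if_neg hb]
      rw [janela_acc resto ([] ++ [prev])]
      simp

-- A's full pass equals B's pass when 2 ≤ f ≤ |fita|
theorem umPasso_eq_pass (fita : List Int) (f : Int) (h2 : 2 ≤ f) (hle : f ≤ (fita.length : Int)) :
    umPasso fita f = ((PySem.List.pyRange 0 f 1).foldl (passoA f) (fita, 0)).1 := by
  rw [umPasso, if_neg (by omega)]
  have e1 : PySem.List.slice fita none (some f) = fita.take f.toNat :=
    PySem.List.slice_to _ (by omega)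
  have e2 : PySem.List.slice fita (some f) none = fita.drop f.toNat :=
    PySem.List.slice_from _ (by omega)
  simp only [e1, e2]
  have hlen : (fita.take f.toNat).length = f.toNat := by
    rw [List.length_take]; omega
  obtain ⟨p, c, resto, htake⟩ : ∃ p c resto, fita.take f.toNat = p :: c :: resto := by
    rcases h : fita.take f.toNat with _ | ⟨p, _ | ⟨c, resto⟩⟩ <;>
      simp [h] at hlen ⊢ <;> omega
  simp only [htake]
  have hresto : (resto.length : Int) = f - 2 := by
    have h := hlen; rw [htake] at h; simp at h; omega
  set tl := fita.drop f.toNat with htl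
  have hfita : fita = (p :: c :: resto) ++ tl := by
    rw [htl, ← htake, List.take_append_drop]
  have hstep : passoA f (fita, 0) 0 = (fita, 0) := by
    unfold passoA
    dsimp only
    rw [if_neg (by rintro ⟨h, _⟩; exact h rfl), if_neg (by rintro ⟨h, _⟩; omega)]
  rw [PySem.List.pyRange_one_cons (by omega)]
  simp only [List.foldl_cons, hstep]
  have h := janela_eq_fold resto [] tl p c 0 f (by simp; omega)
  simp only [List.length_nil, Nat.cast_zero, zero_add, List.nil_append] at h
  rw [hfita]
  simpa using h.symm

-- A's pass preserves the strip's length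
theorem pass_length (f : Int) (ks : List Int) : ∀ (st : List Int × Int),
    ((ks.foldl (passoA f) st).1).length = st.1.length := by
  induction ks with
  | nil => intro st; rfl
  | cons k ks ih =>
    intro st
    rw [List.foldl_cons, ih]
    unfold passoA
    split_ifs <;> simp [PySem.List.length_pySetD]

-- the day loops agree fuel-wise when 2 ≤ f ≤ |strip|
theorem aux_eq_loop (fuel : Nat) : ∀ (strip : List Int) (f dias : Int),
    2 ≤ f → f ≤ (strip.length : Int) →
    quantosAux fuel strip f dias = diasLoop fuel strip f dias := by
  induction fuel with
  | zero => intro strip f dias _ _; rfl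
  | succ fuel ih =>
    intro strip f dias h2 hle
    simp only [quantosAux, diasLoop, umPasso_eq_pass strip f h2 hle]
    by_cases h : 0 ∈ ((PySem.List.pyRange 0 f 1).foldl (passoA f) (strip, 0)).1
    · rw [if_pos h, if_neg (by simpa using h)]
      exact ih _ f (dias + 1) h2 (by rw [pass_length]; exact hle)
    · rw [if_neg h, if_pos (by simpa using h)]

-- ===== VERDICT (by name: the statement is the Claim_ definition above) =====
theorem quantos_dias_spec : Claim_equal_quantos_dias := by
  intro fita f dias _ hpre
  obtain ⟨hle, hor⟩ := hpre
  unfold Spec_quantos_dias quantos_dias quantos_dias_alt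
  by_cases h2 : 2 ≤ f
  · exact aux_eq_loop _ fita f dias h2 hle
  · -- f < 2 forces 0 ∉ fita, so the fuel is 1 and both sides return dias + 1
    have h0 : 0 ∉ fita := by
      rcases hor with h | ⟨hf, _, ht⟩
      · exact h
      · exfalso
        have : 1 ≤ fita.tail.length := List.length_pos_of_mem ht
        have : 2 ≤ fita.length := by cases fita <;> simp_all
        omega
    have hc : fita.count 0 = 0 := List.count_eq_zero.mpr h0
    rw [hc]
    simp only [quantosAux, diasLoop]
    split_ifs <;> simp_all [quantosAux, diasLoop]
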